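-- pv_equiv track=rewrite | github.com/nshaganti/advent-of-code-2025 | day_07.py | part_1
-- ===== SOURCE A (Python) =====
-- def part_1(grid: list[str]) -> int:
--     """
--     Counts the total number of split events.
--
--     Logic:
--         Simulate flow row-by-row using a Set of active column indices.
--         This avoids modifying the original grid (immutability) and prevents
--         part 1 logic from corrupting state for part 2.
--
--     Complexity:
--         Time:  O(H * W) where H is height and W is width. In the worst case (full flood),
--                we check every cell once.
--         Space: O(W) auxiliary space to store the 'active_cols' set for the current row.
--     """
--     height = len(grid)
--     width = len(grid[0])
--
--     # active_cols is a set of x-coordinates containing flow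
--     active_cols = set()
--     for x, char in enumerate(grid[0]):
--         if char == 'S':
--             active_cols.add(x)
--
--     total_splits = 0
--
--     # Process row by row
--     for y in range(height - 1):
--         next_active_cols = set()
--
--         for x in active_cols:
--             below_char = grid[y+1][x]
--
--             if below_char == '.':
--                 next_active_cols.add(x)
--
--             elif below_char == '^':
--                 total_splits += 1
--                 if x > 0:
--                     next_active_cols.add(x - 1)
--                 if x < width - 1:
--                     next_active_cols.add(x + 1)
--
--             elif below_char == 'S':
--                 next_active_cols.add(x)
--
--         active_cols = next_active_cols
--
--     return total_splits
-- ===== SOURCE B (Python) =====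
-- def part_1(grid: list[str]) -> int:
--     """Pull-based dense rescan: instead of pushing flow from each active column
--     (sparse set), recompute every column's activity from its up/up-left/up-right
--     neighbours with a boolean mask, counting '^' hits per row. Short rows are space-padded (dead cells)."""
--     width = len(grid[0])
--     active = [grid[0][x] == 'S' for x in range(width)]
--     splits = 0
--     for y in range(1, len(grid)):
--         row = grid[y].ljust(width)
--         for x in range(width):
--             if active[x] and row[x] == '^':
--                 splits += 1
--         active = [
--             (row[x] in '.S' and active[x])
--             or (x > 0 and row[x - 1] == '^' and active[x - 1])
--             or (x < width - 1 and row[x + 1] == '^' and active[x + 1])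
--             for x in range(width)
--         ]
--     return splits
-- ===== Notes on version B (the rewrite author's own statement) =====
-- stated objective: alternative
-- what changed: Replaces the push-style sparse simulation (a set of active columns, each pushing flow into the next row's set) by a pull-style dense rescan: a fixed-width boolean mask where every column of the next row recomputes its own activity from its up/up-left/up-right neighbours, and splits are counted by a per-row column scan.
-- outside the precondition, e.g. on part_1(['S.', '##', '.']): A returns 0, B returns 0
import Mathlib
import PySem

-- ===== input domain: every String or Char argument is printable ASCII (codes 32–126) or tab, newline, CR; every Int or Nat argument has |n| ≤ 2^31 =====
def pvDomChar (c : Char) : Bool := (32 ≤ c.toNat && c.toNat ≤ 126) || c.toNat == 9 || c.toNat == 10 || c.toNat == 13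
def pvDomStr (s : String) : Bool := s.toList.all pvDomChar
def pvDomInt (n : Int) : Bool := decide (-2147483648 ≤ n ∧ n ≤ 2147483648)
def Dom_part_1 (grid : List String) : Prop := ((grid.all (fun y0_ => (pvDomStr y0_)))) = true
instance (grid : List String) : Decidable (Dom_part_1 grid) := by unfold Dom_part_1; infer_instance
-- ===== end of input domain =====

-- ===== PORT A =====
-- B replaces A's push-style sparse active-column set by a pull-style dense boolean
-- mask recomputed column-by-column each row (alternative decomposition, same cost).

-- inner loop body of A: one active column x flowing into `row`
def part1ACell (width : Int) (row : List Char) (acc : PySem.Set Int × Int) (x : Int) :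
    PySem.Set Int × Int :=
  match PySem.List.pyGet? row x with
  | some c =>
    if c = '.' then (PySem.Set.add acc.1 x, acc.2)
    else if c = '^' then
      let s1 := if 0 < x then PySem.Set.add acc.1 (x - 1) else acc.1
      let s2 := if x < width - 1 then PySem.Set.add s1 (x + 1) else s1
      (s2, acc.2 + 1)
    else if c = 'S' then (PySem.Set.add acc.1 x, acc.2)
    else acc
  | none => acc   -- Python raises IndexError here; excluded by Pre_part_1

-- one iteration of A's `for y in range(height - 1)` loop (row = grid[y+1])
def part1ARow (width : Int) (st : PySem.Set Int × Int) (row : List Char) :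
    PySem.Set Int × Int :=
  st.1.foldl (part1ACell width row) (PySem.Set.empty, st.2)

def part_1 (grid : List String) : Int :=
  let g := grid.map String.toList
  let row0 := g.headD []
  let width : Int := (row0.length : Int)
  let active0 : PySem.Set Int :=
    (PySem.List.enumerate row0 0).foldl
      (fun s p => if p.2 = 'S' then PySem.Set.add s p.1 else s) PySem.Set.empty
  ((g.drop 1).foldl (part1ARow width) (active0, 0)).2

-- ===== PORT B =====
-- one iteration of B's `for y in range(1, len(grid))` loop (row = grid[y])
def part1BRow (width : Nat) (st : List Bool × Int) (rowRaw : List Char) : List Bool × Int :=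
  -- row = grid[y].ljust(width): pad with spaces up to width (exact for ASCII space)
  let row := rowRaw ++ List.replicate (width - rowRaw.length) ' '
  let splits := (List.range width).foldl
    (fun t x => if st.1.getD x false = true ∧ row.getD x ' ' = '^' then t + 1 else t) st.2
  let act := (List.range width).map (fun x =>
    decide (((row.getD x ' ' = '.' ∨ row.getD x ' ' = 'S') ∧ st.1.getD x false = true)
      ∨ (0 < x ∧ row.getD (x - 1) ' ' = '^' ∧ st.1.getD (x - 1) false = true)
      ∨ (x + 1 < width ∧ row.getD (x + 1) ' ' = '^' ∧ st.1.getD (x + 1) false = true)))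
  (act, splits)

def part_1_alt (grid : List String) : Int :=
  let g := grid.map String.toList
  let row0 := g.headD []
  let width := row0.length
  let active0 := (List.range width).map (fun x => decide (row0.getD x ' ' = 'S'))
  ((g.drop 1).foldl (part1BRow width) (active0, 0)).2

-- ===== PRECONDITION & SPEC =====
-- Pre_ excludes the empty grid (A raises IndexError at grid[0]) and, when the first row
-- contains a flow source 'S', grids with a row shorter than the first row: there A raises
-- IndexError exactly when the flow reaches the short row (reachability is not closed-form),
-- so that class is excluded even though A returns on the unreached ones, where B
-- (space-padding) agrees — see cites.
def Pre_part_1 (grid : List String) : Prop :=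
  grid ≠ [] ∧ ('S' ∈ (grid.headD "").toList →
    ∀ r ∈ grid, (grid.headD "").toList.length ≤ r.toList.length)
instance (grid : List String) : Decidable (Pre_part_1 grid) := by
  unfold Pre_part_1; infer_instance

def pvWitness_part_1 : List String := ["S.", "^."]

def Spec_part_1 (grid : List String) (out : Int) : Prop := out = part_1_alt grid
instance (grid : List String) (out : Int) : Decidable (Spec_part_1 grid out) := by
  unfold Spec_part_1; infer_instance

-- ===== CLAIM (what is proved, stated in full; the proofs are below) =====
def Claim_equal_part_1 : Prop :=
  ∀ (grid : List String), Dom_part_1 grid → Pre_part_1 grid → Spec_part_1 grid (part_1 grid)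

-- ===== LEMMAS AND PROOFS =====

-- the columns of the next row that A's cell step at active column x switches on
def PushA (row : List Char) (width : Int) (x y : Int) : Prop :=
  ∃ c, PySem.List.pyGet? row x = some c ∧
    (((c = '.' ∨ c = 'S') ∧ y = x) ∨
      (c = '^' ∧ ((0 < x ∧ y = x - 1) ∨ (x < width - 1 ∧ y = x + 1))))

-- invariant tying A's (set, splits) state to B's (mask, splits) state
def RelAB (width : Nat) (a : PySem.Set Int × Int) (b : List Bool × Int) : Prop :=
  a.2 = b.2 ∧ b.1.length = width ∧ a.1.Nodup ∧
  (∀ x ∈ a.1, 0 ≤ x ∧ x < (width : Int)) ∧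
  (∀ i : Nat, i < width → (((i : Int) ∈ a.1) ↔ b.1.getD i false = true))

lemma cell_mem (width : Int) (row : List Char) (acc : PySem.Set Int × Int) (x y : Int) :
    y ∈ (part1ACell width row acc x).1 ↔ y ∈ acc.1 ∨ PushA row width x y := by
  unfold part1ACell PushA
  rcases h : PySem.List.pyGet? row x with _ | c
  · simp
  · simp only [Option.some.injEq, exists_eq_left']
    by_cases h1 : c = '.'
    · subst h1; simp [PySem.Set.mem_add]
    · by_cases h2 : c = '^'
      · subst h2
        simp only [if_neg h1]
        by_cases hx : 0 < x <;> by_cases hw : x < width - 1 <;>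
          simp [hx, hw, PySem.Set.mem_add] <;> tauto
      · by_cases h3 : c = 'S'
        · subst h3; simp [PySem.Set.mem_add]
        · simp [h1, h2, h3]

lemma cell_nodup (width : Int) (row : List Char) (acc : PySem.Set Int × Int) (x : Int)
    (h : acc.1.Nodup) : (part1ACell width row acc x).1.Nodup := by
  unfold part1ACell
  rcases hg : PySem.List.pyGet? row x with _ | c
  · simpa using h
  · simp only [hg]
    split_ifs <;> first
      | exact h
      | exact PySem.Set.nodup_add _ _ h
      | exact PySem.Set.nodup_add _ _ (PySem.Set.nodup_add _ _ h)

lemma cell_snd (width : Int) (row : List Char) (acc : PySem.Set Int × Int) (x : Int) :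
    (part1ACell width row acc x).2 =
      acc.2 + if PySem.List.pyGet? row x = some '^' then 1 else 0 := by
  unfold part1ACell
  rcases h : PySem.List.pyGet? row x with _ | c
  · simp [h]
  · simp only [h, Option.some.injEq]
    split_ifs with h1 h2 <;> simp_all

lemma pyGet_getD (row : List Char) (i : Nat) (h : i < row.length) :
    PySem.List.pyGet? row (i : Int) = some (row.getD i ' ') := by
  simp [PySem.List.pyGet?_natCast, List.getElem?_eq_getElem h, List.getD_eq_getElem?_getD]

lemma A_inner_mem (width : Int) (row : List Char) :
    ∀ (l : List Int) (acc : PySem.Set Int × Int) (y : Int),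
      (y ∈ (l.foldl (part1ACell width row) acc).1 ↔
        y ∈ acc.1 ∨ ∃ x ∈ l, PushA row width x y) := by
  intro l
  induction l with
  | nil => intro acc y; simp
  | cons x xs ih =>
    intro acc y
    simp only [List.foldl_cons, ih, cell_mem, List.mem_cons]
    constructor
    · rintro (⟨h | h⟩ | ⟨z, hz, hp⟩)
      · exact Or.inl h
      · exact Or.inr ⟨x, Or.inl rfl, h⟩
      · exact Or.inr ⟨z, Or.inr hz, hp⟩
    · rintro (h | ⟨z, (rfl | hz), hp⟩)
      · exact Or.inl (Or.inl h)
      · exact Or.inl (Or.inr hp)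
      · exact Or.inr ⟨z, hz, hp⟩

lemma A_inner_nodup (width : Int) (row : List Char) :
    ∀ (l : List Int) (acc : PySem.Set Int × Int),
      acc.1.Nodup → (l.foldl (part1ACell width row) acc).1.Nodup := by
  intro l
  induction l with
  | nil => intro acc h; simpa using h
  | cons x xs ih =>
    intro acc h
    rw [List.foldl_cons]
    exact ih _ (cell_nodup width row acc x h)

lemma A_inner_snd (width : Int) (row : List Char) :
    ∀ (l : List Int) (acc : PySem.Set Int × Int),
      (l.foldl (part1ACell width row) acc).2 =
        acc.2 + (l.countP (fun x => decide (PySem.List.pyGet? row x = some '^')) : Int) := by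
  intro l
  induction l with
  | nil => intro acc; simp
  | cons x xs ih =>
    intro acc
    simp only [List.foldl_cons, ih, cell_snd, List.countP_cons]
    split_ifs with h <;> simp_all <;> push_cast <;> ring

lemma count_eq (width : Nat) (row : List Char) (a : PySem.Set Int × Int)
    (b : List Bool × Int) (hrow : width ≤ row.length) (hrel : RelAB width a b) :
    (a.1.countP (fun x => decide (PySem.List.pyGet? row x = some '^')) : Int) =
      ((List.range width).countP
        (fun i => decide (b.1.getD i false = true ∧ row.getD i ' ' = '^')) : Int) := by
  obtain ⟨hsnd, hblen, hnd, hbound, hmem⟩ := hrel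
  have hperm : List.Perm
      (a.1.filter (fun x => decide (PySem.List.pyGet? row x = some '^')))
      (((List.range width).filter
        (fun i => decide (b.1.getD i false = true ∧ row.getD i ' ' = '^'))).map
        Int.ofNat) := by
    apply (List.perm_ext_iff_of_nodup (hnd.filter _)
      (((List.nodup_range).filter _).map (fun m n h => by simpa using h))).mpr
    intro y
    simp only [List.mem_filter, List.mem_map, List.mem_range, decide_eq_true_eq, Int.ofNat_eq_natCast]
    constructor
    · rintro ⟨hy, hc⟩
      obtain ⟨h0, hw⟩ := hbound y hy
      refine ⟨y.toNat, ⟨⟨by omega, ?_, ?_⟩, by omega⟩⟩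
      · exact (hmem y.toNat (by omega)).mp (by rwa [Int.toNat_of_nonneg h0])
      · have := pyGet_getD row y.toNat (by omega)
        rw [Int.toNat_of_nonneg h0] at this
        rw [this] at hc
        exact Option.some.inj hc
    · rintro ⟨i, ⟨⟨hi, hm, hc⟩, rfl⟩⟩
      refine ⟨(hmem i hi).mpr hm, ?_⟩
      rw [pyGet_getD row i (by omega), hc]
  have := hperm.length_eq
  rw [List.length_map] at this
  rw [List.countP_eq_length_filter, List.countP_eq_length_filter, this]

lemma push_iff (width : Nat) (row : List Char) (a : PySem.Set Int × Int)
    (b : List Bool × Int) (hrow : width ≤ row.length) (hrel : RelAB width a b)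
    (i : Nat) (hi : i < width) :
    (∃ x ∈ a.1, PushA row (width : Int) x (i : Int)) ↔
      (((row.getD i ' ' = '.' ∨ row.getD i ' ' = 'S') ∧ b.1.getD i false = true)
        ∨ (0 < i ∧ row.getD (i - 1) ' ' = '^' ∧ b.1.getD (i - 1) false = true)
        ∨ (i + 1 < width ∧ row.getD (i + 1) ' ' = '^' ∧ b.1.getD (i + 1) false = true)) := by
  obtain ⟨hsnd, hblen, hnd, hbound, hmem⟩ := hrel
  constructor
  · rintro ⟨x, hx, c, hc, hcase⟩
    obtain ⟨h0, hw⟩ := hbound x hx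
    have hxg : PySem.List.pyGet? row x = some (row.getD x.toNat ' ') := by
      have := pyGet_getD row x.toNat (by omega)
      rwa [Int.toNat_of_nonneg h0] at this
    rw [hxg] at hc
    rcases hcase with ⟨hcs, hyx⟩ | ⟨hcc, ⟨hxpos, hyx⟩ | ⟨hxlt, hyx⟩⟩
    · -- y = x, '.' or 'S'
      have hxi : x.toNat = i := by omega
      refine Or.inl ⟨?_, ?_⟩
      · rw [← hxi]; rcases hcs with h | h <;> [left; right] <;> rw [Option.some.inj hc, h]
      · exact (hmem i hi).mp (by rw [hyx]; exact hx)
    · -- y = x - 1, so x = i + 1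
      have hxi : x.toNat = i + 1 := by omega
      refine Or.inr (Or.inr ⟨by omega, ?_, ?_⟩)
      · rw [← hxi, Option.some.inj hc, hcc]
      · refine (hmem (i + 1) (by omega)).mp ?_
        have hx' : (((i + 1 : Nat)) : Int) = x := by omega
        rw [hx']; exact hx
    · -- y = x + 1, so x = i - 1, 0 < i
      have hipos : 0 < i := by omega
      have hxi : x.toNat = i - 1 := by omega
      refine Or.inr (Or.inl ⟨hipos, ?_, ?_⟩)
      · rw [← hxi, Option.some.inj hc, hcc]
      · refine (hmem (i - 1) (by omega)).mp ?_
        have hx' : (((i - 1 : Nat)) : Int) = x := by omega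
        rw [hx']; exact hx
  · rintro (⟨hcs, hm⟩ | ⟨hipos, hcc, hm⟩ | ⟨hlt, hcc, hm⟩)
    · refine ⟨(i : Int), (hmem i hi).mpr hm, row.getD i ' ', pyGet_getD row i (by omega),
        Or.inl ⟨hcs, rfl⟩⟩
    · refine ⟨((i - 1 : Nat) : Int), (hmem (i - 1) (by omega)).mpr hm, '^', ?_, ?_⟩
      · rw [pyGet_getD row (i - 1) (by omega), hcc]
      · exact Or.inr ⟨rfl, Or.inr ⟨by omega, by omega⟩⟩
    · refine ⟨((i + 1 : Nat) : Int), (hmem (i + 1) (by omega)).mpr hm, '^', ?_, ?_⟩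
      · rw [pyGet_getD row (i + 1) (by omega), hcc]
      · exact Or.inr ⟨rfl, Or.inl ⟨by omega, by omega⟩⟩

lemma row_step (width : Nat) (row : List Char) (a : PySem.Set Int × Int)
    (b : List Bool × Int) (hrow : width ≤ row.length) (hrel : RelAB width a b) :
    RelAB width (part1ARow (width : Int) a row) (part1BRow width b row) := by
  obtain ⟨hsnd, hblen, hnd, hbound, hmem⟩ := hrel
  unfold part1ARow part1BRow
  simp only [Nat.sub_eq_zero_of_le hrow, List.replicate_zero, List.append_nil]
  refine ⟨?_, ?_, ?_, ?_, ?_⟩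
  · -- splits
    rw [A_inner_snd, PySem.List.foldl_ite_add_one]
    rw [count_eq width row a b hrow ⟨hsnd, hblen, hnd, hbound, hmem⟩, hsnd]
  · simp
  · exact A_inner_nodup _ _ _ _ (List.nodup_nil)
  · intro y hy
    rw [A_inner_mem] at hy
    rcases hy with h | ⟨x, hx, c, hc, hcase⟩
    · simp at h
    · obtain ⟨h0, hw⟩ := hbound x hx
      rcases hcase with ⟨_, rfl⟩ | ⟨_, ⟨h1, rfl⟩ | ⟨h1, rfl⟩⟩ <;> constructor <;> omega
  · intro i hi
    rw [A_inner_mem]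
    simp only [PySem.Set.empty, List.not_mem_nil, false_or]
    rw [push_iff width row a b hrow ⟨hsnd, hblen, hnd, hbound, hmem⟩ i hi]
    rw [PySem.List.getD_map_range _ _ _ _ hi]
    simp

lemma init_mem (y : Int) :
    ∀ (l : List (Int × Char)) (s : PySem.Set Int),
      (y ∈ l.foldl (fun s p => if p.2 = 'S' then PySem.Set.add s p.1 else s) s ↔
        y ∈ s ∨ ∃ p ∈ l, p.2 = 'S' ∧ y = p.1) := by
  intro l
  induction l with
  | nil => intro s; simp
  | cons q qs ih =>
    intro s
    simp only [List.foldl_cons, ih, List.mem_cons]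
    have hq : (y ∈ if q.2 = 'S' then PySem.Set.add s q.1 else s) ↔
        y ∈ s ∨ (q.2 = 'S' ∧ y = q.1) := by
      split_ifs with h <;> simp [PySem.Set.mem_add, h]
    rw [hq]
    constructor
    · rintro (h | ⟨p, hp, hs, hy⟩)
      · rcases h with h | h
        · exact Or.inl h
        · exact Or.inr ⟨q, Or.inl rfl, h⟩
      · exact Or.inr ⟨p, Or.inr hp, hs, hy⟩
    · rintro (h | ⟨p, (rfl | hp), hs, hy⟩)
      · exact Or.inl (Or.inl h)
      · exact Or.inl (Or.inr ⟨hs, hy⟩)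
      · exact Or.inr ⟨p, hp, hs, hy⟩

lemma init_nodup :
    ∀ (l : List (Int × Char)) (s : PySem.Set Int), s.Nodup →
      (l.foldl (fun s p => if p.2 = 'S' then PySem.Set.add s p.1 else s) s).Nodup := by
  intro l
  induction l with
  | nil => intro s h; simpa using h
  | cons q qs ih =>
    intro s h
    rw [List.foldl_cons]
    apply ih
    split_ifs with hq
    · exact PySem.Set.nodup_add _ _ h
    · exact h

lemma init_rel (row0 : List Char) :
    RelAB row0.length
      ((PySem.List.enumerate row0 0).foldl
        (fun s p => if p.2 = 'S' then PySem.Set.add s p.1 else s) PySem.Set.empty, 0)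
      ((List.range row0.length).map (fun x => decide (row0.getD x ' ' = 'S')), 0) := by
  have hchar : ∀ y : Int,
      y ∈ (PySem.List.enumerate row0 0).foldl
        (fun s p => if p.2 = 'S' then PySem.Set.add s p.1 else s) PySem.Set.empty ↔
      ∃ k : Nat, ∃ _ : k < row0.length, row0[k] = 'S' ∧ y = (k : Int) := by
    intro y
    rw [init_mem]
    simp only [PySem.Set.empty]
    constructor
    · rintro (h | ⟨p, hp, hs, hy⟩)
      · cases h
      · obtain ⟨k, hk, rfl⟩ := (PySem.List.mem_enumerate_iff row0 0 p).mp hp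
        exact ⟨k, hk, by simpa using hs, by simpa using hy⟩
    · rintro ⟨k, hk, hs, hy⟩
      refine Or.inr ⟨((k : Int), row0[k]), ?_, hs, by simpa using hy⟩
      rw [PySem.List.mem_enumerate_iff]
      exact ⟨k, hk, by simp⟩
  refine ⟨rfl, by simp, init_nodup _ _ List.nodup_nil, ?_, ?_⟩
  · intro x hx
    obtain ⟨k, hk, _, rfl⟩ := (hchar x).mp hx
    constructor <;> omega
  · intro i hi
    rw [hchar, PySem.List.getD_map_range _ _ _ _ hi]
    simp only [decide_eq_true_eq]
    constructor
    · rintro ⟨k, hk, hs, hy⟩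
      have : k = i := by omega
      subst this
      rw [List.getD_eq_getElem row0 ' ' hk]
      exact hs
    · intro h
      refine ⟨i, hi, ?_, rfl⟩
      rwa [List.getD_eq_getElem row0 ' ' hi] at h

lemma A_fold_empty (width : Int) (s : Int) :
    ∀ (rows : List (List Char)),
      rows.foldl (part1ARow width) (PySem.Set.empty, s) = (PySem.Set.empty, s) := by
  intro rows
  induction rows with
  | nil => rfl
  | cons r rs ih => simpa [part1ARow, PySem.Set.empty] using ih

lemma B_row_false (width : Nat) (s : Int) (r : List Char) :
    part1BRow width (List.replicate width false, s) r = (List.replicate width false, s) := by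
  unfold part1BRow
  refine Prod.ext ?_ ?_
  · show List.map _ _ = _
    rw [List.eq_replicate_iff]
    refine ⟨by simp, ?_⟩
    intro b hb
    obtain ⟨x, _, rfl⟩ := List.mem_map.mp hb
    simp
  · show List.foldl _ _ _ = s
    rw [PySem.List.foldl_ite_add_one]
    rw [List.countP_eq_zero.mpr (by intro x _; simp)]
    simp

lemma B_fold_false (width : Nat) (s : Int) :
    ∀ (rows : List (List Char)),
      rows.foldl (part1BRow width) (List.replicate width false, s) = (List.replicate width false, s) := by
  intro rows
  induction rows with
  | nil => rfl
  | cons r rs ih => rw [List.foldl_cons, B_row_false]; exact ih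

lemma init_empty_of_no_S (row0 : List Char) (h : ¬ 'S' ∈ row0) :
    (PySem.List.enumerate row0 0).foldl
      (fun s p => if p.2 = 'S' then PySem.Set.add s p.1 else s) PySem.Set.empty = PySem.Set.empty ∧
    (List.range row0.length).map (fun x => decide (row0.getD x ' ' = 'S')) =
      List.replicate row0.length false := by
  constructor
  · have : ∀ l : List (Int × Char), (∀ p ∈ l, p.2 ≠ 'S') →
        ∀ s : PySem.Set Int, l.foldl (fun s p => if p.2 = 'S' then PySem.Set.add s p.1 else s) s = s := by
      intro l
      induction l with
      | nil => intro _ s; rfl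
      | cons q qs ih =>
        intro hl s
        rw [List.foldl_cons, if_neg (hl q (List.mem_cons_self))]
        exact ih (fun p hp => hl p (List.mem_cons_of_mem _ hp)) s
    refine this _ ?_ _
    intro p hp
    obtain ⟨k, hk, rfl⟩ := (PySem.List.mem_enumerate_iff row0 0 p).mp hp
    exact fun hc => h (hc ▸ List.getElem_mem hk)
  · rw [List.eq_replicate_iff]
    refine ⟨by simp, ?_⟩
    intro b hb
    obtain ⟨x, hx, rfl⟩ := List.mem_map.mp hb
    have hxl : x < row0.length := List.mem_range.mp hx
    rw [List.getD_eq_getElem row0 ' ' hxl]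
    simp only [decide_eq_false_iff_not]
    exact fun hc => h (hc ▸ List.getElem_mem hxl)

lemma fold_rel (width : Nat) :
    ∀ (rows : List (List Char)) (a : PySem.Set Int × Int) (b : List Bool × Int),
      (∀ r ∈ rows, width ≤ r.length) → RelAB width a b →
      RelAB width (rows.foldl (part1ARow (width : Int)) a) (rows.foldl (part1BRow width) b) := by
  intro rows
  induction rows with
  | nil => intro a b _ h; simpa using h
  | cons r rs ih =>
    intro a b hlen hrel
    simp only [List.foldl_cons]
    exact ih _ _ (fun q hq => hlen q (List.mem_cons_of_mem _ hq))
      (row_step width r a b (hlen r (List.mem_cons_self)) hrel)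

-- ===== VERDICT (by name: the statement is the Claim_ definition above) =====
theorem part_1_spec : Claim_equal_part_1 := by
  intro grid _ hpre
  obtain ⟨hne, hlen⟩ := hpre
  unfold Spec_part_1 part_1 part_1_alt
  obtain ⟨h, t, rfl⟩ : ∃ h t, grid = h :: t := by
    cases grid with
    | nil => exact absurd rfl hne
    | cons h t => exact ⟨h, t, rfl⟩
  simp only [List.map_cons, List.headD_cons, List.drop_succ_cons, List.drop_zero]
  by_cases hS : 'S' ∈ h.toList
  · have hrows : ∀ r ∈ t.map String.toList, h.toList.length ≤ r.length := by
      intro r hr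
      obtain ⟨s, hs, rfl⟩ := List.mem_map.mp hr
      have := hlen (by simpa using hS) s (List.mem_cons_of_mem _ hs)
      simpa using this
    exact (fold_rel h.toList.length (t.map String.toList) _ _ hrows (init_rel h.toList)).1
  · obtain ⟨hA, hB⟩ := init_empty_of_no_S h.toList hS
    rw [hA]
    exact (congrArg Prod.snd (A_fold_empty (h.toList.length : Int) 0 (t.map String.toList))).trans
      (((congrArg
          (fun m => (List.foldl (part1BRow h.toList.length) (m, (0 : Int))
            (t.map String.toList)).2) hB).trans
        (congrArg Prod.snd (B_fold_false h.toList.length 0 (t.map String.toList)))).symm)
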